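-- pv_equiv track=rewrite | github.com/batrachianai/toad | src/toad/widgets/github_views/task_provider.py | _summarize_ci
-- ===== SOURCE A (Python) =====
-- from typing import Any, Protocol, runtime_checkable
--
-- def _summarize_ci(rollup: list[dict[str, Any]]) -> str:
--     """Collapse a statusCheckRollup list to one of SUCCESS / FAILURE / PENDING / NONE."""
--     if not rollup:
--         return "NONE"
--     states: set[str] = set()
--     for entry in rollup:
--         state = (
--             entry.get("state")
--             or entry.get("conclusion")
--             or entry.get("status")
--             or ""
--         ).upper()
--         if state:
--             states.add(state)
--     if "FAILURE" in states or "ERROR" in states: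
--         return "FAILURE"
--     if "PENDING" in states or "IN_PROGRESS" in states or "QUEUED" in states:
--         return "PENDING"
--     if states and all(s in {"SUCCESS", "COMPLETED"} for s in states):
--         return "SUCCESS"
--     return "NONE"
-- ===== SOURCE B (Python) =====
-- _SEVERITY_TABLE = ["NONE", "SUCCESS", "NONE", "PENDING", "FAILURE"]
--
-- def _rank(entry):
--     """Severity of one entry on the total order NONE=0 < SUCCESS=1 < UNKNOWN=2 < PENDING=3 < FAILURE=4."""
--     s = (entry.get("state") or entry.get("conclusion") or entry.get("status") or "").upper()
--     if not s:
--         return 0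
--     if s in ("FAILURE", "ERROR"):
--         return 4
--     if s in ("PENDING", "IN_PROGRESS", "QUEUED"):
--         return 3
--     if s in ("SUCCESS", "COMPLETED"):
--         return 1
--     return 2
--
-- def _summarize_ci(rollup):
--     """Collapse a statusCheckRollup list to one of SUCCESS / FAILURE / PENDING / NONE."""
--     return _SEVERITY_TABLE[max(map(_rank, rollup), default=0)]
-- ===== Notes on version B (the rewrite author's own statement) =====
-- stated objective: alternative
-- what changed: B replaces A's collected set of states and its three priority membership queries by a reduction to a single max over a 5-point severity order (NONE=0 < SUCCESS=1 < UNKNOWN=2 < PENDING=3 < FAILURE=4): each entry is mapped to a rank, the summary is the table entry at the maximum rank, because the summary operation is the join of that total order.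
import Mathlib
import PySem

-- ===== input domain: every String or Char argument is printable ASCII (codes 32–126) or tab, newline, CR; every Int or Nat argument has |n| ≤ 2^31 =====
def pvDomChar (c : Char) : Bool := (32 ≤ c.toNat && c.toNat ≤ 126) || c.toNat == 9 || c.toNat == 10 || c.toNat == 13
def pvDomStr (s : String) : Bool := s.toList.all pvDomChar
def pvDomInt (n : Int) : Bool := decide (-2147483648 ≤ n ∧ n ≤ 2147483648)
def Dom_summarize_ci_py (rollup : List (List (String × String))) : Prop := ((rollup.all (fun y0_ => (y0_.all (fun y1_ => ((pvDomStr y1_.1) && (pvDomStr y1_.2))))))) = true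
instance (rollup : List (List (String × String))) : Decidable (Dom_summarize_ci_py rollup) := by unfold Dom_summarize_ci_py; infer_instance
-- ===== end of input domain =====

-- B replaces A's set of states and its priority queries by one max over a 5-point severity order
-- (NONE=0 < SUCCESS=1 < UNKNOWN=2 < PENDING=3 < FAILURE=4): the summary is the join of that order.

-- shared helper: the `(entry.get("state") or entry.get("conclusion") or entry.get("status") or "").upper()` expression
-- (identical line in both Pythons); `pyOrStr` is Python's `or` on an Optional[str] left operand ('' and None are falsy)
def pyOrStr (o : Option String) (alt : String) : String :=
  match o with
  | some s => if s = "" then alt else s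
  | none => alt

def ciState (entry : List (String × String)) : String :=
  PySem.Str.upper
    (pyOrStr ((PySem.Dict.mk entry).get? "state")
      (pyOrStr ((PySem.Dict.mk entry).get? "conclusion")
        (pyOrStr ((PySem.Dict.mk entry).get? "status") "")))

-- ===== PORT A =====
def summarize_ci_py (rollup : List (List (String × String))) : String :=
  if rollup = [] then "NONE"
  else
    let states : PySem.Set String :=
      rollup.foldl
        (fun states entry =>
          let state := ciState entry
          if state ≠ "" then PySem.Set.add states state else states)
        PySem.Set.empty
    if PySem.Set.contains states "FAILURE" || PySem.Set.contains states "ERROR" then "FAILURE"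
    else if PySem.Set.contains states "PENDING" || PySem.Set.contains states "IN_PROGRESS"
            || PySem.Set.contains states "QUEUED" then "PENDING"
    else if states ≠ [] ∧ states.all (fun s => s == "SUCCESS" || s == "COMPLETED") then "SUCCESS"
    else "NONE"

-- ===== PORT B =====
-- _rank: severity of one entry (0/1/2/3/4)
def ci_rank (entry : List (String × String)) : Nat :=
  let s := ciState entry
  if s = "" then 0
  else if s = "FAILURE" ∨ s = "ERROR" then 4
  else if s = "PENDING" ∨ s = "IN_PROGRESS" ∨ s = "QUEUED" then 3
  else if s = "SUCCESS" ∨ s = "COMPLETED" then 1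
  else 2

-- `_SEVERITY_TABLE[max(map(_rank, rollup), default=0)]`; `.getD … ""` is exact: the index is always 0..4
def summarize_ci_py_alt (rollup : List (List (String × String))) : String :=
  ["NONE", "SUCCESS", "NONE", "PENDING", "FAILURE"].getD
    ((rollup.map ci_rank).foldl Nat.max 0) ""

-- ===== PRECONDITION & SPEC =====
def Spec_summarize_ci_py (rollup : List (List (String × String))) (out : String) : Prop := out = summarize_ci_py_alt rollup
instance (rollup : List (List (String × String))) (out : String) : Decidable (Spec_summarize_ci_py rollup out) := by unfold Spec_summarize_ci_py; infer_instance

-- ===== CLAIM (what is proved, stated in full; the proofs are below) =====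
def Claim_equal_summarize_ci_py : Prop := ∀ (rollup : List (List (String × String))), Dom_summarize_ci_py rollup → Spec_summarize_ci_py rollup (summarize_ci_py rollup)

-- ===== LEMMAS AND PROOFS =====

-- the nonempty states of the rollup, in order
def ciStates (rollup : List (List (String × String))) : List String :=
  (rollup.map ciState).filter (fun s => s ≠ "")

-- rank of a (nonempty) state string
def rkS (s : String) : Nat :=
  if s = "FAILURE" ∨ s = "ERROR" then 4
  else if s = "PENDING" ∨ s = "IN_PROGRESS" ∨ s = "QUEUED" then 3
  else if s = "SUCCESS" ∨ s = "COMPLETED" then 1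
  else 2

lemma foldA_eq (rollup : List (List (String × String))) (acc : PySem.Set String) :
    rollup.foldl
      (fun states entry =>
        let state := ciState entry
        if state ≠ "" then PySem.Set.add states state else states) acc
    = (ciStates rollup).foldl PySem.Set.add acc := by
  induction rollup generalizing acc with
  | nil => rfl
  | cons e t ih =>
      simp only [List.foldl_cons]
      rw [ih]
      by_cases h : ciState e = ""
      · simp [ciStates, h]
      · simp [ciStates, h]

lemma mem_foldl_set_add (l : List String) (acc : PySem.Set String) (x : String) :
    x ∈ l.foldl PySem.Set.add acc ↔ x ∈ acc ∨ x ∈ l := by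
  induction l generalizing acc with
  | nil => simp
  | cons a t ih => simp [ih, PySem.Set.mem_add]; tauto

lemma foldl_set_add_nil_iff (l : List String) :
    l.foldl PySem.Set.add PySem.Set.empty = [] ↔ l = [] := by
  constructor
  · intro h
    by_contra hne
    match l, hne with
    | a :: t, _ =>
        have : a ∈ (a :: t).foldl PySem.Set.add PySem.Set.empty := by
          rw [mem_foldl_set_add]; simp
        rw [h] at this; simp at this
  · rintro rfl; rfl

-- B's max over entry ranks equals the max over the ranks of the nonempty states
lemma foldB_eq (rollup : List (List (String × String))) (a : Nat) :
    (rollup.map ci_rank).foldl Nat.max a = ((ciStates rollup).map rkS).foldl Nat.max a := by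
  induction rollup generalizing a with
  | nil => rfl
  | cons e t ih =>
      by_cases h : ciState e = ""
      · simp [ciStates, h, ci_rank, ih]
      · simp [ciStates, h, ci_rank, rkS, ih]

lemma le_foldl_max (l : List Nat) (a : Nat) : a ≤ l.foldl Nat.max a := by
  induction l generalizing a with
  | nil => simp
  | cons b t ih => exact le_trans (Nat.le_max_left a b) (ih _)

lemma mem_le_foldl_max (l : List Nat) (a x : Nat) (hx : x ∈ l) : x ≤ l.foldl Nat.max a := by
  induction l generalizing a with
  | nil => simp at hx
  | cons b t ih =>
      rcases List.mem_cons.mp hx with rfl | h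
      · exact le_trans (Nat.le_max_right a x) (le_foldl_max _ _)
      · exact ih _ h

lemma foldl_max_mem (l : List Nat) (a : Nat) : l.foldl Nat.max a = a ∨ l.foldl Nat.max a ∈ l := by
  induction l generalizing a with
  | nil => simp
  | cons b t ih =>
      rcases ih (Nat.max a b) with h | h
      · rcases Nat.le_total a b with hab | hab
        · right
          have hm : Nat.max a b = b := Nat.max_eq_right hab
          rw [List.foldl_cons, h, hm]; simp
        · left
          have hm : Nat.max a b = a := Nat.max_eq_left hab
          rw [List.foldl_cons, h, hm]
      · right; simp [h]

lemma rkS_cases (s : String) (h : s ≠ "") :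
    (rkS s = 4 ∧ (s = "FAILURE" ∨ s = "ERROR"))
    ∨ (rkS s = 3 ∧ (s = "PENDING" ∨ s = "IN_PROGRESS" ∨ s = "QUEUED"))
    ∨ (rkS s = 1 ∧ (s = "SUCCESS" ∨ s = "COMPLETED"))
    ∨ (rkS s = 2 ∧ ¬(s = "FAILURE" ∨ s = "ERROR") ∧ ¬(s = "PENDING" ∨ s = "IN_PROGRESS" ∨ s = "QUEUED")
        ∧ ¬(s = "SUCCESS" ∨ s = "COMPLETED")) := by
  unfold rkS
  split_ifs with h1 h2 h3
  · exact Or.inl ⟨rfl, h1⟩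
  · exact Or.inr (Or.inl ⟨rfl, h2⟩)
  · exact Or.inr (Or.inr (Or.inl ⟨rfl, h3⟩))
  · exact Or.inr (Or.inr (Or.inr ⟨rfl, h1, h2, h3⟩))

theorem summarize_ci_py_spec_aux (rollup : List (List (String × String))) :
    summarize_ci_py rollup = summarize_ci_py_alt rollup := by
  unfold summarize_ci_py summarize_ci_py_alt
  rw [foldA_eq, foldB_eq]
  set L := ciStates rollup with hLdef
  have hLne : ∀ s ∈ L, s ≠ "" := by
    intro s hs
    have := List.mem_filter.mp (hLdef ▸ hs)
    simpa using this.2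
  set M := (L.map rkS).foldl Nat.max 0 with hM
  have hub : ∀ s ∈ L, rkS s ≤ M := fun s hs =>
    mem_le_foldl_max _ _ _ (List.mem_map_of_mem hs)
  have hwit : M = 0 ∨ ∃ s ∈ L, rkS s = M := by
    rcases foldl_max_mem (L.map rkS) 0 with h | h
    · exact Or.inl h
    · right; rcases List.mem_map.mp h with ⟨s, hs, he⟩; exact ⟨s, hs, he⟩
  have hmem : ∀ x, x ∈ L.foldl PySem.Set.add PySem.Set.empty ↔ x ∈ L := by
    intro x; rw [mem_foldl_set_add]; simp [PySem.Set.empty]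
  have hc1 : (PySem.Set.contains (L.foldl PySem.Set.add PySem.Set.empty) "FAILURE"
      || PySem.Set.contains (L.foldl PySem.Set.add PySem.Set.empty) "ERROR") = true
      ↔ ("FAILURE" ∈ L ∨ "ERROR" ∈ L) := by
    simp only [Bool.or_eq_true, PySem.Set.contains_iff, hmem]
  have hc2 : (PySem.Set.contains (L.foldl PySem.Set.add PySem.Set.empty) "PENDING"
      || PySem.Set.contains (L.foldl PySem.Set.add PySem.Set.empty) "IN_PROGRESS"
      || PySem.Set.contains (L.foldl PySem.Set.add PySem.Set.empty) "QUEUED") = true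
      ↔ ("PENDING" ∈ L ∨ "IN_PROGRESS" ∈ L ∨ "QUEUED" ∈ L) := by
    simp only [Bool.or_eq_true, PySem.Set.contains_iff, hmem]; tauto
  have hc3 : (L.foldl PySem.Set.add PySem.Set.empty ≠ [] ∧
      (L.foldl PySem.Set.add PySem.Set.empty).all (fun s => s == "SUCCESS" || s == "COMPLETED") = true)
      ↔ (L ≠ [] ∧ ∀ s ∈ L, s = "SUCCESS" ∨ s = "COMPLETED") := by
    simp only [ne_eq, foldl_set_add_nil_iff, List.all_eq_true, hmem, Bool.or_eq_true, beq_iff_eq]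
  -- rank facts
  have hF : "FAILURE" ∈ L ∨ "ERROR" ∈ L → 4 ≤ M := by
    rintro (h | h) <;> · have := hub _ h; simp [rkS] at this; omega
  have hP : "PENDING" ∈ L ∨ "IN_PROGRESS" ∈ L ∨ "QUEUED" ∈ L → 3 ≤ M := by
    rintro (h | h | h) <;> · have := hub _ h; simp [rkS] at this; omega
  have hMle : M ≤ 4 := by
    rcases hwit with h0 | ⟨s, hs, he⟩
    · omega
    · rcases rkS_cases s (hLne s hs) with ⟨h,_⟩|⟨h,_⟩|⟨h,_⟩|⟨h,_⟩ <;> omega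
  by_cases hnil : rollup = []
  · subst hnil; rfl
  rw [if_neg hnil]
  have hcase : M = 0 ∨ M = 1 ∨ M = 2 ∨ M = 3 ∨ M = 4 := by omega
  rcases hcase with h0 | h1 | h2 | h3 | h4
  -- M = 0 : L is empty, everything false, NONE
  · have hLnil : L = [] := by
      rcases L with _ | ⟨s, t⟩
      · rfl
      · exfalso
        have hle := hub s (by simp)
        rcases rkS_cases s (hLne s (by simp)) with ⟨h,_⟩|⟨h,_⟩|⟨h,_⟩|⟨h,_⟩ <;> omega
    rw [hLnil, h0]; rfl
  -- M = 1 : all SUCCESS/COMPLETED, nonempty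
  · have hnc1 : ¬("FAILURE" ∈ L ∨ "ERROR" ∈ L) := fun h => by have := hF h; omega
    have hnc2 : ¬("PENDING" ∈ L ∨ "IN_PROGRESS" ∈ L ∨ "QUEUED" ∈ L) := fun h => by have := hP h; omega
    have hall : L ≠ [] ∧ ∀ s ∈ L, s = "SUCCESS" ∨ s = "COMPLETED" := by
      rcases hwit with h | ⟨s, hs, _⟩
      · omega
      constructor
      · intro he; rw [he] at hs; simp at hs
      · intro t ht
        have hle := hub t ht
        rcases rkS_cases t (hLne t ht) with ⟨h,_⟩|⟨h,_⟩|⟨_,h⟩|⟨h,_⟩ <;> first | exact h | omega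
    rw [if_neg (fun h => hnc1 (hc1.mp h)), if_neg (fun h => hnc2 (hc2.mp h)),
        if_pos (hc3.mpr hall), h1]
    rfl
  -- M = 2 : no failure/pending, but some unknown state, NONE
  · have hnc1 : ¬("FAILURE" ∈ L ∨ "ERROR" ∈ L) := fun h => by have := hF h; omega
    have hnc2 : ¬("PENDING" ∈ L ∨ "IN_PROGRESS" ∈ L ∨ "QUEUED" ∈ L) := fun h => by have := hP h; omega
    have hnc3 : ¬(L ≠ [] ∧ ∀ s ∈ L, s = "SUCCESS" ∨ s = "COMPLETED") := by
      rintro ⟨-, hall⟩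
      rcases hwit with h | ⟨s, hs, he⟩
      · omega
      have := hall s hs
      rcases rkS_cases s (hLne s hs) with ⟨h,_⟩|⟨h,_⟩|⟨h,_⟩|⟨h,_,_,hns⟩ <;> first | omega | exact hns this
    rw [if_neg (fun h => hnc1 (hc1.mp h)), if_neg (fun h => hnc2 (hc2.mp h)),
        if_neg (fun h => hnc3 (hc3.mp h)), h2]
    rfl
  -- M = 3 : PENDING
  · have hnc1 : ¬("FAILURE" ∈ L ∨ "ERROR" ∈ L) := fun h => by have := hF h; omega
    have hp : "PENDING" ∈ L ∨ "IN_PROGRESS" ∈ L ∨ "QUEUED" ∈ L := by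
      rcases hwit with h | ⟨s, hs, he⟩
      · omega
      rcases rkS_cases s (hLne s hs) with ⟨h,_⟩|⟨h,hmem3⟩|⟨h,_⟩|⟨h,_⟩
      · omega
      · rcases hmem3 with rfl | rfl | rfl
        · exact Or.inl hs
        · exact Or.inr (Or.inl hs)
        · exact Or.inr (Or.inr hs)
      · omega
      · omega
    rw [if_neg (fun h => hnc1 (hc1.mp h)), if_pos (hc2.mpr hp), h3]
    rfl
  -- M = 4 : FAILURE
  · have hf : "FAILURE" ∈ L ∨ "ERROR" ∈ L := by
      rcases hwit with h | ⟨s, hs, he⟩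
      · omega
      rcases rkS_cases s (hLne s hs) with ⟨h,hmem4⟩|⟨h,_⟩|⟨h,_⟩|⟨h,_⟩
      · rcases hmem4 with rfl | rfl
        · exact Or.inl hs
        · exact Or.inr hs
      · omega
      · omega
      · omega
    rw [if_pos (hc1.mpr hf), h4]
    rfl

-- ===== VERDICT (by name: the statement is the Claim_ definition above) =====
theorem summarize_ci_py_spec : Claim_equal_summarize_ci_py := by
  intro rollup _
  unfold Spec_summarize_ci_py
  exact summarize_ci_py_spec_aux rollup
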